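-- pv_equiv track=rewrite | github.com/amirhamzakhan2001/nlp-email-categorization | src/graph/label_path.py | build_label_path
-- ===== SOURCE A (Python) =====
-- def build_label_path(cluster_id: str, leaf_checkpoint: dict) -> str:
--     if not cluster_id:
--         return ""
--
--     parts = cluster_id.split(".")
--     ids = [".".join(parts[:i]) for i in range(1, len(parts) + 1)]
--
--     labels = [
--         leaf_checkpoint[i]["label"]
--         for i in ids
--         if i in leaf_checkpoint
--     ]
--
--     return " -> ".join(labels)
-- ===== SOURCE B (Python) =====
-- def build_label_path(cluster_id: str, leaf_checkpoint: dict) -> str: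
--     if not cluster_id:
--         return ""
--
--     matches = sorted(
--         (k for k in leaf_checkpoint
--          if k == cluster_id or cluster_id.startswith(k + ".")),
--         key=len,
--     )
--     return " -> ".join(leaf_checkpoint[k]["label"] for k in matches)
-- ===== Notes on version B (the rewrite author's own statement) =====
-- stated objective: alternative
-- what changed: A walks the cluster_id: it rebuilds every dotted prefix by slicing parts[:i] and then filters/looks each up in the checkpoint; B walks the CHECKPOINT instead: it keeps the keys k with k == cluster_id or cluster_id.startswith(k + '.') (exactly the dotted prefixes) and sorts them by length, which reproduces A's shortest-to-longest order because distinct dotted prefixes have distinct lengths.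
import Mathlib
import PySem

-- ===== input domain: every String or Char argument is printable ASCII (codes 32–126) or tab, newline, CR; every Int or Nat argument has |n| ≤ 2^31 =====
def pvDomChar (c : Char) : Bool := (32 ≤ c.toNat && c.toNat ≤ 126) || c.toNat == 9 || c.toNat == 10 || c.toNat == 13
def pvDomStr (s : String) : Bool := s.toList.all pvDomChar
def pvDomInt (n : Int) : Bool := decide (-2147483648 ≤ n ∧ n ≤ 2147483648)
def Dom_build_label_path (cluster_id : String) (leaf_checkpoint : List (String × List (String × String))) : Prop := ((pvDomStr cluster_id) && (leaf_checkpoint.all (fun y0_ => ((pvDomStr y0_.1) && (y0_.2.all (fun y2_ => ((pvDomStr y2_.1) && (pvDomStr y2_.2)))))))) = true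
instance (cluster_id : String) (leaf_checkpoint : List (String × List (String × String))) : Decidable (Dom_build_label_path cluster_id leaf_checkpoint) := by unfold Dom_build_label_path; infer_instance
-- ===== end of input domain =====

-- B scans the CHECKPOINT instead of the cluster id: it keeps the keys that are dotted
-- prefixes of cluster_id (k == cluster_id or cluster_id.startswith(k + ".")) and sorts
-- them by length (distinct dotted prefixes have distinct lengths, so this is A's order);
-- objective: alternative, not claimed faster.

-- ===== PORT A =====
-- leaf_checkpoint[i] / [..]["label"] are reached only when the key is present (Pre_ below
-- excludes the KeyError inputs), so the total getD form with an arbitrary default is exact there.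
def build_label_path (cluster_id : String) (leaf_checkpoint : List (String × List (String × String))) : String :=
  if cluster_id = "" then ""
  else
    let parts := (PySem.Str.split? cluster_id ".").getD []
    let ids := (PySem.List.pyRange 1 ((parts.length : Int) + 1) 1).map
      (fun i => PySem.Str.join "." (PySem.List.slice parts none (some i)))
    let labels := (ids.filter (fun i => (PySem.Dict.mk leaf_checkpoint).contains i)).map
      (fun i => PySem.Dict.getD
        (PySem.Dict.mk (PySem.Dict.getD (PySem.Dict.mk leaf_checkpoint) i [])) "label" "")
    PySem.Str.join " -> " labels

-- ===== PORT B =====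
-- 'for k in leaf_checkpoint' iterates the dict's (distinct) keys in insertion order =
-- PySem.List.dedup of the association list's keys; leaf_checkpoint[k]["label"] is reached
-- only when present (Pre_), so the getD form is exact there, as in port A.
def build_label_path_alt (cluster_id : String) (leaf_checkpoint : List (String × List (String × String))) : String :=
  if cluster_id = "" then ""
  else
    let ms := PySem.List.sorted
      ((PySem.List.dedup (leaf_checkpoint.map (fun kv => kv.1))).filter
        (fun k => k == cluster_id || PySem.Str.startswith cluster_id (k ++ ".")))
      (fun k => (PySem.Str.len k : Int))
    PySem.Str.join " -> " (ms.map (fun k =>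
      PySem.Dict.getD (PySem.Dict.mk (PySem.Dict.getD (PySem.Dict.mk leaf_checkpoint) k [])) "label" ""))

-- ===== PRECONDITION & SPEC =====
-- the dotted prefixes of cluster_id, in order (p1, p1.p2, p1.p2.p3, …)
def pvPrefixesFrom (p : String) : List String → List String
  | [] => []
  | x :: xs => (p ++ "." ++ x) :: pvPrefixesFrom (p ++ "." ++ x) xs

def pvPrefixes : List String → List String
  | [] => []
  | x :: xs => x :: pvPrefixesFrom x xs

-- Pre_ excludes exactly the inputs where Python A raises KeyError: a dotted prefix of
-- cluster_id that is a key of leaf_checkpoint whose value lacks the key "label"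
-- (B raises the same KeyError there).
def Pre_build_label_path (cluster_id : String) (leaf_checkpoint : List (String × List (String × String))) : Prop :=
  ∀ i ∈ pvPrefixes ((PySem.Str.split? cluster_id ".").getD []),
    (((PySem.Dict.mk leaf_checkpoint).get? i).all
      (fun e => ((PySem.Dict.mk e).get? "label").isSome)) = true

instance (cluster_id : String) (leaf_checkpoint : List (String × List (String × String))) : Decidable (Pre_build_label_path cluster_id leaf_checkpoint) := by unfold Pre_build_label_path; infer_instance

def pvWitness_build_label_path : String × (List (String × List (String × String))) :=
  ("a.b", [("a", [("label", "Tech")]), ("a.b", [("label", "AI")])])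

def Spec_build_label_path (cluster_id : String) (leaf_checkpoint : List (String × List (String × String))) (out : String) : Prop := out = build_label_path_alt cluster_id leaf_checkpoint
instance (cluster_id : String) (leaf_checkpoint : List (String × List (String × String))) (out : String) : Decidable (Spec_build_label_path cluster_id leaf_checkpoint out) := by unfold Spec_build_label_path; infer_instance

-- ===== CLAIM (what is proved, stated in full; the proofs are below) =====
def Claim_equal_build_label_path : Prop := ∀ (cluster_id : String) (leaf_checkpoint : List (String × List (String × String))), Dom_build_label_path cluster_id leaf_checkpoint → Pre_build_label_path cluster_id leaf_checkpoint → Spec_build_label_path cluster_id leaf_checkpoint (build_label_path cluster_id leaf_checkpoint)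

-- ===== LEMMAS AND PROOFS =====

def pvDsplit (cur : List Char) : List Char → List (List Char)
  | [] => [cur]
  | c :: rest => if c = '.' then cur :: pvDsplit [] rest else pvDsplit (cur ++ [c]) rest
def pvCJoin : List (List Char) → List Char
  | [] => []
  | [x] => x
  | x :: xs => x ++ '.' :: pvCJoin xs
def pvCPfx : List (List Char) → List (List Char)
  | [] => []
  | x :: xs => x :: (pvCPfx xs).map (fun t => x ++ '.' :: t)
theorem pvDsplit_ne_nil (cur cs) : pvDsplit cur cs ≠ [] := by
  induction cs generalizing cur with
  | nil => simp [pvDsplit]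
  | cons c rest ih =>
    simp only [pvDsplit]; split_ifs
    · simp
    · exact ih _

theorem pvSplitOn_go_eq (fuel : Nat) (l cur : List Char) (acc : List (List Char))
    (h : l.length < fuel) :
    PySem.Chars.splitOn.go ['.'] fuel l cur acc = acc.reverse ++ pvDsplit cur.reverse l := by
  induction fuel generalizing l cur acc with
  | zero => omega
  | succ fuel ih =>
    cases l with
    | nil =>
      rw [PySem.Chars.splitOn.go]
      · simp [pvDsplit]
      · omega
    | cons c rest =>
      rw [PySem.Chars.splitOn.go]
      by_cases hc : c = '.'
      · subst hc
        have hp : List.isPrefixOf ['.'] ('.' :: rest) = true := by simp [List.isPrefixOf]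
        simp only [hp, if_true, List.length_cons] at *
        rw [ih _ _ _ (by simpa using Nat.lt_of_succ_lt_succ h)]
        simp [pvDsplit, List.drop]
      · have hp : List.isPrefixOf ['.'] (c :: rest) = false := by
          simp [List.isPrefixOf, Ne.symm hc]
        simp only [hp, if_false, Bool.false_eq_true]
        rw [ih _ _ _ (by simpa using Nat.lt_of_succ_lt_succ h)]
        simp [pvDsplit, hc]

theorem pvSplitOn_eq (cs : List Char) : PySem.Chars.splitOn cs ['.'] = pvDsplit [] cs := by
  rw [PySem.Chars.splitOn, pvSplitOn_go_eq _ _ _ _ (by omega)]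
  simp

theorem pvCJoin_cons (x : List Char) (xs : List (List Char)) (h : xs ≠ []) :
    pvCJoin (x :: xs) = x ++ '.' :: pvCJoin xs := by
  cases xs with
  | nil => exact absurd rfl h
  | cons y r => rfl

theorem pvCJoin_dsplit (cs : List Char) (cur : List Char) :
    pvCJoin (pvDsplit cur cs) = cur ++ cs := by
  induction cs generalizing cur with
  | nil => simp [pvDsplit, pvCJoin]
  | cons c rest ih =>
    simp only [pvDsplit]
    by_cases hc : c = '.'
    · subst hc
      rw [if_pos rfl, pvCJoin_cons _ _ (pvDsplit_ne_nil _ _), ih]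
      simp
    · rw [if_neg hc, ih]
      simp

theorem pvDsplit_dotfree (cs : List Char) : ∀ (cur : List Char), ('.' : Char) ∉ cur →
    ∀ p ∈ pvDsplit cur cs, ('.' : Char) ∉ p := by
  induction cs with
  | nil => intro cur h p hp; simp [pvDsplit] at hp; subst hp; exact h
  | cons c rest ih =>
    intro cur h p hp
    simp only [pvDsplit] at hp
    by_cases hc : c = '.'
    · rw [if_pos hc] at hp
      rcases List.mem_cons.mp hp with rfl | hp
      · exact h
      · exact ih [] (by simp) p hp
    · rw [if_neg hc] at hp
      exact ih (cur ++ [c]) (by simp [h, Ne.symm hc]) p hp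

theorem pvAlign (x : List Char) (hx : ('.' : Char) ∉ x) (k w : List Char) :
    k ++ ['.'] <+: x ++ '.' :: w ↔ (k = x ∨ ∃ k', k = x ++ '.' :: k' ∧ k' ++ ['.'] <+: w) := by
  induction x generalizing k with
  | nil =>
    cases k with
    | nil => simp
    | cons c k1 =>
      simp only [List.nil_append, List.cons_append, List.cons_prefix_cons]
      constructor
      · rintro ⟨rfl, h⟩; exact Or.inr ⟨k1, rfl, h⟩
      · rintro (h | ⟨k', hk, h⟩)
        · exact absurd h (by simp)
        · obtain ⟨rfl, rfl⟩ : c = '.' ∧ k1 = k' := by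
            simpa using hk
          exact ⟨rfl, h⟩
  | cons a x1 ih =>
    have ha : a ≠ '.' := fun h => hx (h ▸ List.mem_cons_self)
    have hx1 : ('.' : Char) ∉ x1 := fun h => hx (List.mem_cons_of_mem _ h)
    cases k with
    | nil =>
      simp only [List.nil_append, List.cons_append, List.cons_prefix_cons]
      constructor
      · rintro ⟨h, -⟩; exact absurd h.symm ha
      · rintro (h | ⟨k', hk, -⟩) <;> simp_all
    | cons c k1 =>
      simp only [List.cons_append, List.cons_prefix_cons]
      constructor
      · rintro ⟨rfl, h⟩
        rcases (ih hx1 k1).mp h with rfl | ⟨k', rfl, h'⟩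
        · exact Or.inl rfl
        · exact Or.inr ⟨k', rfl, h'⟩
      · rintro (h | ⟨k', hk, h'⟩)
        · obtain ⟨rfl, rfl⟩ : c = a ∧ k1 = x1 := by simpa using h
          exact ⟨rfl, (ih hx1 _).mpr (Or.inl rfl)⟩
        · obtain ⟨rfl, rfl⟩ : c = a ∧ k1 = x1 ++ '.' :: k' := by simpa using hk
          exact ⟨rfl, (ih hx1 _).mpr (Or.inr ⟨k', rfl, h'⟩)⟩

theorem pvCPfx_char (pss : List (List Char)) (hne : pss ≠ [])
    (hdf : ∀ p ∈ pss, ('.' : Char) ∉ p) (k : List Char) :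
    k ∈ pvCPfx pss ↔ (k = pvCJoin pss ∨ k ++ ['.'] <+: pvCJoin pss) := by
  induction pss generalizing k with
  | nil => exact absurd rfl hne
  | cons x xs ih =>
    cases xs with
    | nil =>
      simp only [pvCPfx, pvCJoin, List.map_nil, List.mem_singleton]
      constructor
      · intro h; exact Or.inl h
      · rintro (h | h)
        · exact h
        · exact absurd (h.sublist.mem (by simp)) (hdf x List.mem_cons_self)
    | cons y r =>
      have hxdf : ('.' : Char) ∉ x := hdf x List.mem_cons_self
      have hrest : ∀ p ∈ y :: r, ('.' : Char) ∉ p := fun p hp => hdf p (List.mem_cons_of_mem _ hp)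
      rw [pvCJoin_cons _ _ (by simp), pvAlign x hxdf k (pvCJoin (y :: r))]
      show k ∈ x :: (pvCPfx (y :: r)).map (fun t => x ++ '.' :: t) ↔ _
      rw [List.mem_cons, List.mem_map]
      constructor
      · rintro (rfl | ⟨t, ht, rfl⟩)
        · exact Or.inr (Or.inl rfl)
        · rcases (ih (by simp) hrest t).mp ht with rfl | h
          · exact Or.inl rfl
          · exact Or.inr (Or.inr ⟨t, rfl, h⟩)
      · rintro (rfl | rfl | ⟨k', rfl, h⟩)
        · exact Or.inr ⟨pvCJoin (y :: r), (ih (by simp) hrest _).mpr (Or.inl rfl), rfl⟩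
        · exact Or.inl rfl
        · exact Or.inr ⟨k', (ih (by simp) hrest _).mpr (Or.inr h), rfl⟩

theorem pvPrefixesFrom_eq_map (xs : List String) (p : String) :
    pvPrefixesFrom p xs = (pvPrefixes xs).map (fun t => p ++ "." ++ t) := by
  induction xs generalizing p with
  | nil => simp [pvPrefixesFrom, pvPrefixes]
  | cons y ys ih =>
    simp only [pvPrefixesFrom, pvPrefixes, List.map_cons]
    congr 1
    rw [ih (p ++ "." ++ y), ih y, List.map_map]
    apply List.map_congr_left
    intro t _
    simp [String.append_assoc]

theorem pvPrefixes_toList (ps : List String) :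
    (pvPrefixes ps).map String.toList = pvCPfx (ps.map String.toList) := by
  induction ps with
  | nil => simp [pvPrefixes, pvCPfx]
  | cons x xs ih =>
    simp only [pvPrefixes, pvCPfx, List.map_cons]
    congr 1
    rw [pvPrefixesFrom_eq_map, List.map_map, ← ih, List.map_map]
    apply List.map_congr_left
    intro t _
    simp [String.toList_append]

theorem pvLen_lt_of_mem_from (p : String) (xs : List String) :
    ∀ t ∈ pvPrefixesFrom p xs, PySem.Str.len p < PySem.Str.len t := by
  induction xs generalizing p with
  | nil => intro t ht; simp [pvPrefixesFrom] at ht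
  | cons x ys ih =>
    intro t ht
    rcases List.mem_cons.mp ht with rfl | ht
    · simp [PySem.Str.len_eq, String.toList_append]
    · have h1 := ih (p ++ "." ++ x) t ht
      have h2 : PySem.Str.len p < PySem.Str.len (p ++ "." ++ x) := by
        simp [PySem.Str.len_eq, String.toList_append]
      omega

theorem pvPrefixes_pairwise (ps : List String) :
    (pvPrefixes ps).Pairwise (fun a b => PySem.Str.len a < PySem.Str.len b) := by
  cases ps with
  | nil => simp [pvPrefixes]
  | cons x xs =>
    simp only [pvPrefixes]
    induction xs generalizing x with
    | nil => simp [pvPrefixesFrom]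
    | cons y ys ih =>
      simp only [pvPrefixesFrom]
      rw [List.pairwise_cons]
      refine ⟨?_, ih (x ++ "." ++ y)⟩
      intro t ht
      rcases List.mem_cons.mp ht with rfl | ht
      · simp [PySem.Str.len_eq, String.toList_append]
      · have := pvLen_lt_of_mem_from (x ++ "." ++ y) ys t ht
        have h2 : PySem.Str.len x < PySem.Str.len (x ++ "." ++ y) := by
          simp [PySem.Str.len_eq, String.toList_append]
        omega

theorem pv_join_singleton (sep p : String) : PySem.Str.join sep [p] = p := by
  apply String.toList_inj.mp
  simp [PySem.Str.toList_join, PySem.Chars.join_singleton]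

-- joining two leading pieces equals joining their sep-concatenation
theorem pv_join_cons_cons (sep p x : String) (l : List String) :
    PySem.Str.join sep (p :: x :: l) = PySem.Str.join sep ((p ++ sep ++ x) :: l) := by
  apply String.toList_inj.mp
  cases l with
  | nil =>
    simp [PySem.Str.toList_join, PySem.Chars.join_cons_cons, PySem.Chars.join_singleton,
      String.toList_append]
  | cons c r =>
    simp [PySem.Str.toList_join, PySem.Chars.join_cons_cons, String.toList_append,
      List.append_assoc]

-- A's id list (join of every take) is the running-prefix list
theorem pv_ids_eq_prefixes (xs : List String) (p : String) :
    (List.range (xs.length + 1)).map (fun k => PySem.Str.join "." ((p :: xs).take (k + 1)))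
      = p :: pvPrefixesFrom p xs := by
  induction xs generalizing p with
  | nil => simp [List.range_one, pvPrefixesFrom, pv_join_singleton]
  | cons x xs ih =>
    simp only [List.length_cons]
    rw [List.range_succ_eq_map]
    simp only [List.map_cons, List.map_map]
    show _ :: _ = p :: (p ++ "." ++ x) :: pvPrefixesFrom (p ++ "." ++ x) xs
    congr 1
    · simp [pv_join_singleton]
    · rw [← ih (p ++ "." ++ x)]
      apply List.map_congr_left
      intro k _
      simp only [Function.comp_apply, List.take_succ_cons]
      exact pv_join_cons_cons "." p x (List.take k xs)

-- the split pieces of a nonempty cluster_id, at the char level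
theorem pvSplit_parts (cid : String) (parts : List String)
    (hsplit : PySem.Str.split? cid "." = some parts) :
    parts.map String.toList = pvDsplit [] cid.toList := by
  have hm := PySem.Str.split?_map cid "."
  rw [hsplit] at hm
  rw [show ("." : String).toList = ['.'] from by decide] at hm
  rw [PySem.Chars.split?, if_neg (by simp), pvSplitOn_eq] at hm
  simpa using hm

-- the membership test B applies to a key is exactly 'is a dotted prefix of cluster_id'
theorem pvPred_iff (cid : String) (parts : List String)
    (hsplit : PySem.Str.split? cid "." = some parts) (k : String) :
    (k == cid || PySem.Str.startswith cid (k ++ ".")) = true ↔ k ∈ pvPrefixes parts := by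
  have hparts := pvSplit_parts cid parts hsplit
  have hmem : k ∈ pvPrefixes parts ↔ k.toList ∈ pvCPfx (parts.map String.toList) := by
    rw [← pvPrefixes_toList]
    exact (List.mem_map_of_injective (fun a b => String.toList_inj.mp)).symm
  rw [hmem, hparts,
    pvCPfx_char _ (pvDsplit_ne_nil _ _) (pvDsplit_dotfree _ [] (by simp)),
    pvCJoin_dsplit, List.nil_append]
  have hsw : PySem.Str.startswith cid (k ++ ".") = true ↔ (k.toList ++ ['.']) <+: cid.toList := by
    rw [show PySem.Str.startswith cid (k ++ ".")
        = PySem.Chars.startswith cid.toList (k ++ ".").toList from by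
      simp [PySem.Str.startswith_eq]]
    rw [PySem.Chars.startswith_iff]
    simp [String.toList_append]
  constructor
  · intro h
    rcases Bool.or_eq_true_iff.mp h with h | h
    · exact Or.inl (by simpa [String.toList_inj] using (beq_iff_eq.mp h))
    · exact Or.inr (hsw.mp h)
  · rintro (h | h)
    · exact Bool.or_eq_true_iff.mpr (Or.inl (beq_iff_eq.mpr (String.toList_inj.mp (by simpa using h))))
    · exact Bool.or_eq_true_iff.mpr (Or.inr (hsw.mpr h))

-- ===== VERDICT (by name: the statement is the Claim_ definition above) =====
theorem build_label_path_spec : Claim_equal_build_label_path := by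
  intro cid lc _ _
  unfold Spec_build_label_path build_label_path build_label_path_alt
  by_cases hc : cid = ""
  · simp [hc]
  · rw [if_neg hc, if_neg hc]
    obtain ⟨parts, hsplit⟩ : ∃ parts, PySem.Str.split? cid "." = some parts := by
      cases h : PySem.Str.split? cid "." with
      | some p => exact ⟨p, rfl⟩
      | none =>
        exfalso
        have hm := PySem.Str.split?_map cid "."
        rw [h, show ("." : String).toList = ['.'] from by decide,
          PySem.Chars.split?, if_neg (by simp)] at hm
        simp at hm
    have hparts := pvSplit_parts cid parts hsplit
    have hpne : parts ≠ [] := by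
      intro h
      rw [h] at hparts
      exact pvDsplit_ne_nil [] cid.toList hparts.symm
    rw [hsplit]
    simp only [Option.getD_some]
    -- name both sides' label lookup
    set f : String → String := fun i =>
      PySem.Dict.getD (PySem.Dict.mk (PySem.Dict.getD (PySem.Dict.mk lc) i [])) "label" ""
      with hf
    -- A's id list is the prefix list
    have hids : (PySem.List.pyRange 1 ((parts.length : Int) + 1) 1).map
        (fun i => PySem.Str.join "." (PySem.List.slice parts none (some i)))
        = pvPrefixes parts := by
      cases parts with
      | nil => exact absurd rfl hpne
      | cons p xs =>
        rw [PySem.List.pyRange_one, List.map_map]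
        have hl : ((((p :: xs).length : Int) + 1) - 1).toNat = xs.length + 1 := by simp
        rw [hl, show pvPrefixes (p :: xs) = p :: pvPrefixesFrom p xs from rfl,
          ← pv_ids_eq_prefixes xs p]
        apply List.map_congr_left
        intro k _
        simp only [Function.comp_apply]
        have hcast : (1 : Int) + (k : Int) = ((k + 1 : Nat) : Int) := by push_cast; ring
        rw [hcast, PySem.List.slice_to_natCast]
    rw [hids]
    -- B's sorted match list is A's filtered prefix list
    have hnodup_pfx : (pvPrefixes parts).Nodup :=
      (pvPrefixes_pairwise parts).imp (fun h heq => by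
        rw [heq] at h; exact lt_irrefl _ h)
    have hms : PySem.List.sorted
        ((PySem.List.dedup (lc.map (fun kv => kv.1))).filter
          (fun k => k == cid || PySem.Str.startswith cid (k ++ ".")))
        (fun k => (PySem.Str.len k : Int))
        = (pvPrefixes parts).filter (fun i => (PySem.Dict.mk lc).contains i) := by
      apply PySem.List.sorted_eq_of_perm_of_pairwise_lt
      · rw [List.perm_ext_iff_of_nodup
          (hnodup_pfx.filter _) ((PySem.List.nodup_dedup _).filter _)]
        intro x
        rw [List.mem_filter, List.mem_filter, PySem.List.mem_dedup,
          pvPred_iff cid parts hsplit x,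
          PySem.Dict.contains_eq_decide_mem_keys]
        rw [show (PySem.Dict.mk lc).keys = lc.map (fun kv => kv.1) from by
          simp [PySem.Dict.keys_mk]]
        simp [and_comm]
      · refine (List.Pairwise.sublist List.filter_sublist (pvPrefixes_pairwise parts)).imp ?_
        intro a b h
        exact_mod_cast h
    rw [hms]
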